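-- pv_equiv track=rewrite | github.com/diegom1610/qa-dashboard | backfill_dates_and_workspace.py | determine_360_queue
-- ===== SOURCE A (Python) =====
-- BILLING_360_TAGS = [
--     'payments', 'billing-verifications', 'Billing - top-up-issue',
--     'billing', 'top-up', 'billing-top-up-issue'
-- ]
--
-- CEQ_360_TAGS = [
--     'reports', 'scammers', 'ceq-verifications',
--     'publicprofile', 'ceq'
-- ]
--
-- def determine_360_queue(tags: list) -> tuple:
--     """Determine if conversation is 360 queue and what type"""
--     lower_tags = [t.lower() for t in tags]
--
--     is_billing = any(t.lower() in lower_tags for t in BILLING_360_TAGS)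
--     is_ceq = any(t.lower() in lower_tags for t in CEQ_360_TAGS)
--
--     if is_billing and is_ceq:
--         return True, 'both'
--     elif is_billing:
--         return True, 'billing'
--     elif is_ceq:
--         return True, 'ceq'
--
--     return False, None
-- ===== SOURCE B (Python) =====
-- BILLING_360_TAGS = [
--     'payments', 'billing-verifications', 'Billing - top-up-issue',
--     'billing', 'top-up', 'billing-top-up-issue'
-- ]
--
-- CEQ_360_TAGS = [
--     'reports', 'scammers', 'ceq-verifications',
--     'publicprofile', 'ceq'
-- ]
--
-- _BILLING_SET = {t.lower() for t in BILLING_360_TAGS}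
-- _CEQ_SET = {t.lower() for t in CEQ_360_TAGS}
--
-- def determine_360_queue(tags: list) -> tuple:
--     """Determine if conversation is 360 queue and what type"""
--     is_billing = False
--     is_ceq = False
--     for tag in tags:
--         lt = tag.lower()
--         if lt in _BILLING_SET:
--             is_billing = True
--         if lt in _CEQ_SET:
--             is_ceq = True
--     if is_billing and is_ceq:
--         return True, 'both'
--     elif is_billing:
--         return True, 'billing'
--     elif is_ceq:
--         return True, 'ceq'
--     return False, None
-- ===== Notes on version B (the rewrite author's own statement) =====
-- stated objective: faster
-- what changed: Inverts the iteration axis: instead of two any()-scans over the constant tag lists each searching the lowered input list, B precomputes the two lowered constant sets once and does a single pass over the input tags, setting two flags by set membership.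
import Mathlib
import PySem

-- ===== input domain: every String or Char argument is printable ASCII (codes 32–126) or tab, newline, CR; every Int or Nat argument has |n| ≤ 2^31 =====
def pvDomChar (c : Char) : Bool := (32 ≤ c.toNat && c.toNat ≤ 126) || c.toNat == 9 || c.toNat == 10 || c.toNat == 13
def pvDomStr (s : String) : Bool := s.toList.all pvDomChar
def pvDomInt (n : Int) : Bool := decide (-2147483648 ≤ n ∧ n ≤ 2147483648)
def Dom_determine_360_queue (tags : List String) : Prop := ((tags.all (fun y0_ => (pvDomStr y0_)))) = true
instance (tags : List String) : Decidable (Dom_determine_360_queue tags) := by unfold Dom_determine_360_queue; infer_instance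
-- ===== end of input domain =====

-- B replaces A's two any()-scans over the constant lists by one pass over the input tags
-- against two precomputed lowered sets (objective: alternative; same return values).

-- ===== PORT A =====
def BILLING_360_TAGS : List String :=
  ["payments", "billing-verifications", "Billing - top-up-issue",
   "billing", "top-up", "billing-top-up-issue"]

def CEQ_360_TAGS : List String :=
  ["reports", "scammers", "ceq-verifications", "publicprofile", "ceq"]

def determine_360_queue (tags : List String) : Bool × Option String :=
  let lower_tags := tags.map PySem.Str.lower
  let is_billing := BILLING_360_TAGS.any (fun t => lower_tags.contains (PySem.Str.lower t))
  let is_ceq := CEQ_360_TAGS.any (fun t => lower_tags.contains (PySem.Str.lower t))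
  if is_billing && is_ceq then (true, some "both")
  else if is_billing then (true, some "billing")
  else if is_ceq then (true, some "ceq")
  else (false, none)

-- ===== PORT B =====
def pvBillingSet : PySem.Set String :=
  PySem.Set.ofList (BILLING_360_TAGS.map PySem.Str.lower)

def pvCeqSet : PySem.Set String :=
  PySem.Set.ofList (CEQ_360_TAGS.map PySem.Str.lower)

def determine_360_queue_alt (tags : List String) : Bool × Option String :=
  let st := tags.foldl (fun (fl : Bool × Bool) tag =>
      let lt := PySem.Str.lower tag
      (if pvBillingSet.contains lt then true else fl.1,
       if pvCeqSet.contains lt then true else fl.2))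
    (false, false)
  if st.1 && st.2 then (true, some "both")
  else if st.1 then (true, some "billing")
  else if st.2 then (true, some "ceq")
  else (false, none)

-- ===== PRECONDITION & SPEC =====
def Spec_determine_360_queue (tags : List String) (out : Bool × Option String) : Prop := out = determine_360_queue_alt tags
instance (tags : List String) (out : Bool × Option String) : Decidable (Spec_determine_360_queue tags out) := by unfold Spec_determine_360_queue; infer_instance

-- ===== CLAIM (what is proved, stated in full; the proofs are below) =====
def Claim_equal_determine_360_queue : Prop := ∀ (tags : List String), Dom_determine_360_queue tags → Spec_determine_360_queue tags (determine_360_queue tags)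

-- ===== LEMMAS AND PROOFS =====

-- B's fold returns the two flags OR-ed with "some tag's lowering is in the set".
theorem pv_fold_flags (tags : List String) (b c : Bool) :
    tags.foldl (fun (fl : Bool × Bool) tag =>
        let lt := PySem.Str.lower tag
        (if pvBillingSet.contains lt then true else fl.1,
         if pvCeqSet.contains lt then true else fl.2)) (b, c)
    = (b || tags.any (fun t => pvBillingSet.contains (PySem.Str.lower t)),
       c || tags.any (fun t => pvCeqSet.contains (PySem.Str.lower t))) := by
  induction tags generalizing b c with
  | nil => simp
  | cons t ts ih =>
    simp only [List.foldl_cons, List.any_cons, ih]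
    split_ifs <;> simp_all

-- Axis inversion: scanning the constant list L for a lowered tag equals scanning the
-- tags for membership in the lowered-constants set.
theorem pv_axis_swap (L : List String) (tags : List String) :
    L.any (fun t => (tags.map PySem.Str.lower).contains (PySem.Str.lower t))
      = tags.any (fun t => (PySem.Set.ofList (L.map PySem.Str.lower)).contains (PySem.Str.lower t)) := by
  rw [Bool.eq_iff_iff]
  simp only [List.any_eq_true, PySem.Set.contains, List.contains_iff_mem, List.mem_map,
    PySem.Set.mem_ofList]
  aesop

-- ===== VERDICT (by name: the statement is the Claim_ definition above) =====
theorem determine_360_queue_spec : Claim_equal_determine_360_queue := by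
  intro tags _
  unfold Spec_determine_360_queue determine_360_queue determine_360_queue_alt
  rw [pv_fold_flags]
  simp only [Bool.false_or, pvBillingSet, pvCeqSet, ← pv_axis_swap]
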